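-- pv_equiv track=rewrite | github.com/theSnackOverflow/coding-test | 프로그래머스/0/181829. 이차원 배열 대각선 순회하기/이차원 배열 대각선 순회하기.py | solution
-- ===== SOURCE A (Python) =====
-- def solution(board, k):
--     answer = 0
--     num_rows = int(len(board))
--     num_cols = int(len(board[0]))
--     for i in range(num_rows):
--         for j in range(num_cols):
--             if (i + j) <= k:
--                 answer += board[i][j]
--
--     return answer
-- ===== SOURCE B (Python) =====
-- def solution(board, k):
--     num_cols = len(board[0])
--     total = 0
--     for i, row in enumerate(board):
--         c = min(max(k - i + 1, 0), num_cols)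
--         total += sum(row[:c])
--     return total
-- ===== Notes on version B (the rewrite author's own statement) =====
-- stated objective: faster
-- what changed: Replaces the per-cell (i+j)<=k test in a nested Python loop by computing, per row, the clamped count of valid columns and summing one prefix slice row[:c] with the builtin sum.
import Mathlib
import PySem

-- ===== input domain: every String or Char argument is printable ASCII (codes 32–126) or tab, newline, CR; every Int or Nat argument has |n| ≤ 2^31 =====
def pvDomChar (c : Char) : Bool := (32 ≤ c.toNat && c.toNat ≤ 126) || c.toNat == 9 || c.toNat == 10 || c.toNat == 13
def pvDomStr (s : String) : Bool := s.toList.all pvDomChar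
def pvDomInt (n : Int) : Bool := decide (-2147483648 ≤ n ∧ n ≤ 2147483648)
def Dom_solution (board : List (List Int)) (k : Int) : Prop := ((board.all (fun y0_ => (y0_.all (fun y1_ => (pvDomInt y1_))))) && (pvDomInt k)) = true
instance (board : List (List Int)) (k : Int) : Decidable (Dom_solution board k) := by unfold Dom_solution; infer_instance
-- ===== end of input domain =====

-- B replaces the per-cell (i+j)<=k test by a clamped per-row prefix-slice sum (simpler decomposition).


-- ===== PORT A =====
-- board[0] / board[i][j]: Pre_solution guarantees every access made is in range, so getD is exact there.
def solution (board : List (List Int)) (k : Int) : Int :=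
  let numRows := board.length
  let numCols := (board.headD []).length
  (List.range numRows).foldl (fun (answer : Int) (i : Nat) =>
    (List.range numCols).foldl (fun (a : Int) (j : Nat) =>
      if (i : Int) + (j : Int) ≤ k then a + (board.getD i []).getD j 0 else a) answer) 0

-- ===== PORT B =====
def solution_alt (board : List (List Int)) (k : Int) : Int :=
  let numCols := (board.headD []).length
  (PySem.List.enumerate board).foldl (fun total p =>
    total + (p.2.take (min (max (k - p.1 + 1) 0) (numCols : Int)).toNat).sum) 0

-- ===== PRECONDITION & SPEC =====
-- Pre_ is exactly A's return domain: the board is nonempty (board[0] else raises IndexError) and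
-- every cell board[i][j] with j < len(board[0]) and i+j <= k that A reads exists (else IndexError on a ragged board).
def Pre_solution (board : List (List Int)) (k : Int) : Prop :=
  board ≠ [] ∧ ∀ i < board.length, ∀ j < (board.headD []).length,
    ((i : Int) + (j : Int) ≤ k → j < (board.getD i []).length)
instance (board : List (List Int)) (k : Int) : Decidable (Pre_solution board k) := by
  unfold Pre_solution; infer_instance
def pvWitness_solution : List (List Int) × Int := ([[1, 2], [3, 4]], 1)
def Spec_solution (board : List (List Int)) (k : Int) (out : Int) : Prop := out = solution_alt board k
instance (board : List (List Int)) (k : Int) (out : Int) : Decidable (Spec_solution board k out) := by unfold Spec_solution; infer_instance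

-- ===== CLAIM (what is proved, stated in full; the proofs are below) =====
def Claim_equal_solution : Prop := ∀ (board : List (List Int)) (k : Int), Dom_solution board k → Pre_solution board k → Spec_solution board k (solution board k)

-- ===== LEMMAS AND PROOFS =====

-- sum of the clamped prefix of one row
def rowSum (row : List Int) (k : Int) (i : Int) (nc : Nat) : Int :=
  (row.take (min (max (k - i + 1) 0) (nc : Int)).toNat).sum

theorem sum_take_succ (l : List Int) (n : Nat) (h : n < l.length) :
    (l.take (n + 1)).sum = (l.take n).sum + l.getD n 0 := by
  rw [List.take_add_one, List.sum_append, List.getElem?_eq_getElem h]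
  simp [List.getD, List.getElem?_eq_getElem h]

-- A's inner loop over range nc equals the clamped prefix sum, given the reads are in range.
theorem innerA (row : List Int) (k : Int) (i : Nat) (nc : Nat) (acc : Int)
    (h : ∀ j, j < min ((k - (i : Int) + 1).toNat) nc → j < row.length) :
    (List.range nc).foldl (fun (a : Int) (j : Nat) =>
        if (i : Int) + (j : Int) ≤ k then a + row.getD j 0 else a) acc
      = acc + rowSum row k i nc := by
  induction nc generalizing acc with
  | zero => simp [rowSum]
  | succ n ih =>
    rw [List.range_succ, List.foldl_append]
    rw [ih acc (fun j hj => h j (by omega))]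
    simp only [List.foldl_cons, List.foldl_nil]
    unfold rowSum
    by_cases hc : (i : Int) + (n : Int) ≤ k
    · have ht : n < (k - (i : Int) + 1).toNat := by omega
      have h1 : (min (max (k - (i : Int) + 1) 0) ((n + 1 : Nat) : Int)).toNat = n + 1 := by
        omega
      have h2 : (min (max (k - (i : Int) + 1) 0) ((n : Nat) : Int)).toNat = n := by
        omega
      have hn : n < row.length := h n (by omega)
      rw [if_pos hc, h1, h2, sum_take_succ row n hn]
      ring
    · have h1 : (min (max (k - (i : Int) + 1) 0) ((n + 1 : Nat) : Int)).toNat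
              = (min (max (k - (i : Int) + 1) 0) ((n : Nat) : Int)).toNat := by
        omega
      rw [if_neg hc, h1]

theorem foldl_add_gen {α : Type} (l : List α) (f : α → Int) (acc : Int) :
    l.foldl (fun a x => a + f x) acc = acc + (l.map f).sum := by
  induction l generalizing acc with
  | nil => simp
  | cons x xs ih => simp [ih]; ring


-- ===== VERDICT (by name: the statement is the Claim_ definition above) =====
theorem solution_spec : Claim_equal_solution := by
  intro board k _ hpre
  unfold Spec_solution solution solution_alt
  simp only []
  set nc := (board.headD []).length with hnc
  -- A side
  have hA : (List.range board.length).foldl (fun (answer : Int) (i : Nat) =>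
      (List.range nc).foldl (fun (a : Int) (j : Nat) =>
        if (i : Int) + (j : Int) ≤ k then a + (board.getD i []).getD j 0 else a) answer) 0
      = ((List.range board.length).map (fun i => rowSum (board.getD i []) k i nc)).sum := by
    rw [PySem.List.foldl_congr_mem (g := fun answer i => answer + rowSum (board.getD i []) k i nc)]
    · rw [foldl_add_gen]; simp
    · intro acc i hi
      have hi' : i < board.length := List.mem_range.mp hi
      exact innerA _ k i nc acc (fun j hj => hpre.2 i hi' j (by omega) (by omega))
  rw [hA]
  -- B side
  rw [PySem.List.enumerate_eq_map_pyRange (d := [])]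
  rw [List.foldl_map]
  rw [foldl_add_gen]
  rw [PySem.List.pyRange_one]
  simp only [List.map_map, Int.sub_zero, zero_add]
  congr 1
  apply List.map_congr_left
  intro i hi
  simp [Function.comp, PySem.List.pyGetD_natCast, rowSum]
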